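-- pv_equiv track=rewrite | github.com/zioyou/agent-middleware | src/agent_server/services/permission_service.py | _resolve_permissions
-- ===== SOURCE A (Python) =====
-- def _resolve_permissions(
--
--     role_perms: list[str],
--     custom_granted: list[str],
--     custom_denied: list[str],
-- ) -> list[str]:
--     all_perms = set(role_perms) | set(custom_granted)
--
--     for denied in custom_denied:
--         if denied == "*":
--             return []
--
--         all_perms.discard(denied)
--
--         if denied.endswith(":*"):
--             prefix = denied[:-1]
--             all_perms = {p for p in all_perms if not p.startswith(prefix)}
--
--     return sorted(all_perms)
-- ===== SOURCE B (Python) =====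
-- def _resolve_permissions(
--     role_perms: list[str],
--     custom_granted: list[str],
--     custom_denied: list[str],
-- ) -> list[str]:
--     if "*" in custom_denied:
--         return []
--     denied_exact = set(custom_denied)
--     prefixes = [d[:-1] for d in custom_denied if d.endswith(":*")]
--     all_perms = set(role_perms) | set(custom_granted)
--     return sorted(
--         p for p in all_perms
--         if p not in denied_exact
--         and not any(p.startswith(pre) for pre in prefixes)
--     )
-- ===== Notes on version B (the rewrite author's own statement) =====
-- stated objective: alternative
-- what changed: Replaces A's loop over denials that repeatedly mutates/rebuilds the permission set with an upfront '*' short-circuit, a prebuilt exact-denial set and prefix list, and a single filtering pass over the union of permissions.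
import Mathlib
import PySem

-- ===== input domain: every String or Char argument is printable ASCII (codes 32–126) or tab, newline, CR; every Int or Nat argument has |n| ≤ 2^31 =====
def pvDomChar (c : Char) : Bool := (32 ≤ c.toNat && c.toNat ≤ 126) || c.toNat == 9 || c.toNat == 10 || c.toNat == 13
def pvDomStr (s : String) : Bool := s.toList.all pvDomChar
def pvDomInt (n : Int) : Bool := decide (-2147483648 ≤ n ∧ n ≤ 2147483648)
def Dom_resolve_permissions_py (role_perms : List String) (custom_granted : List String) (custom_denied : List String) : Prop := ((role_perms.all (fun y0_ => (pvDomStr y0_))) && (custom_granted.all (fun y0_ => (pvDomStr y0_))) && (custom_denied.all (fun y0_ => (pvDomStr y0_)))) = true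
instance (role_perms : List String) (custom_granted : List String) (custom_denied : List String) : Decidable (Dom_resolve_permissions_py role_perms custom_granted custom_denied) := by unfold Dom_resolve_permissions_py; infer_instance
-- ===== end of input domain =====

-- B replaces A's denial-by-denial mutation/rebuild of the permission set with an upfront '*'
-- short-circuit, a prebuilt exact-denial set plus prefix list, and one filtering pass (alternative
-- decomposition; return values proved equal).

-- ===== PORT A =====
-- the 'for denied in custom_denied' loop, with the early 'return []' on '*'
def pyAResolveLoop (all_perms : PySem.Set String) : List String → List String
  | [] => PySem.List.sorted all_perms (fun x => x) false
  | denied :: rest =>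
      if denied == "*" then []
      else
        let s1 := PySem.Set.discard all_perms denied
        -- the set comprehension rebuilding all_perms is exact as a set (result consumed order-independently)
        let s2 := if PySem.Str.endswith denied ":*" then
            s1.filter (fun p => !PySem.Str.startswith p (PySem.Str.slice denied none (some (-1))))
          else s1
        pyAResolveLoop s2 rest

def resolve_permissions_py (role_perms : List String) (custom_granted : List String) (custom_denied : List String) : List String :=
  pyAResolveLoop (PySem.Set.union (PySem.Set.ofList role_perms) (PySem.Set.ofList custom_granted)) custom_denied

-- ===== PORT B =====
def resolve_permissions_py_alt (role_perms : List String) (custom_granted : List String) (custom_denied : List String) : List String :=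
  if custom_denied.contains "*" then []
  else
    let denied_exact : PySem.Set String := PySem.Set.ofList custom_denied
    let prefixes : List String := (custom_denied.filter (fun d => PySem.Str.endswith d ":*")).map
        (fun d => PySem.Str.slice d none (some (-1)))
    let all_perms : PySem.Set String := PySem.Set.union (PySem.Set.ofList role_perms) (PySem.Set.ofList custom_granted)
    PySem.List.sorted
      (all_perms.filter (fun p =>
        !PySem.Set.contains denied_exact p && !prefixes.any (fun pre => PySem.Str.startswith p pre)))
      (fun x => x) false

-- ===== PRECONDITION & SPEC =====
def Spec_resolve_permissions_py (role_perms : List String) (custom_granted : List String) (custom_denied : List String) (out : List String) : Prop := out = resolve_permissions_py_alt role_perms custom_granted custom_denied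
instance (role_perms : List String) (custom_granted : List String) (custom_denied : List String) (out : List String) : Decidable (Spec_resolve_permissions_py role_perms custom_granted custom_denied out) := by unfold Spec_resolve_permissions_py; infer_instance

-- ===== CLAIM (what is proved, stated in full; the proofs are below) =====
def Claim_equal_resolve_permissions_py : Prop := ∀ (role_perms : List String) (custom_granted : List String) (custom_denied : List String), Dom_resolve_permissions_py role_perms custom_granted custom_denied → Spec_resolve_permissions_py role_perms custom_granted custom_denied (resolve_permissions_py role_perms custom_granted custom_denied)

-- ===== LEMMAS AND PROOFS =====

-- B's combined denial predicate, over the still-unprocessed denial list cd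
def pvDenyPred (cd : List String) (p : String) : Bool :=
  !cd.contains p &&
    !((cd.filter (fun d => PySem.Str.endswith d ":*")).map
        (fun d => PySem.Str.slice d none (some (-1)))).any (fun pre => PySem.Str.startswith p pre)

-- A's loop computes B's single pass
theorem pyAResolveLoop_eq (cd : List String) : ∀ s : List String,
    pyAResolveLoop s cd =
      if cd.contains "*" then []
      else PySem.List.sorted (s.filter (pvDenyPred cd)) (fun x => x) false := by
  induction cd with
  | nil =>
      intro s
      have h1 : pvDenyPred [] = fun _ => true := by funext p; simp [pvDenyPred]
      simp [pyAResolveLoop, h1]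
  | cons d rest ih =>
      intro s
      by_cases hd : d = "*"
      · simp [pyAResolveLoop, hd]
      · rw [pyAResolveLoop]
        simp only [beq_iff_eq, hd, if_false]
        have hc : (d :: rest).contains "*" = rest.contains "*" := by
          simp [Ne.symm hd]
        rw [hc]
        by_cases hend : PySem.Str.endswith d ":*" = true
        · rw [if_pos hend, ih]
          by_cases hw : rest.contains "*" = true
          · rw [if_pos hw, if_pos hw]
          · rw [if_neg hw, if_neg hw]
            have hfil : List.filter (pvDenyPred rest)
                ((PySem.Set.discard s d).filter
                  (fun p => !PySem.Str.startswith p (PySem.Str.slice d none (some (-1))))) =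
                List.filter (pvDenyPred (d :: rest)) s := by
              rw [PySem.Set.discard, List.filter_filter, List.filter_filter]
              apply List.filter_congr
              intro p _
              simp only [pvDenyPred, List.contains_cons, List.filter_cons, hend, if_pos,
                List.map_cons, List.any_cons, Bool.not_or]
              cases rest.contains p <;> cases hpd : (p == d) <;>
                cases PySem.Str.startswith p (PySem.Str.slice d none (some (-1))) <;>
                cases ((rest.filter (fun d => PySem.Str.endswith d ":*")).map
                  (fun d => PySem.Str.slice d none (some (-1)))).any
                    (fun pre => PySem.Str.startswith p pre) <;>
                simp_all [BEq.comm]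
            rw [hfil]
        · rw [if_neg hend, ih]
          by_cases hw : rest.contains "*" = true
          · rw [if_pos hw, if_pos hw]
          · rw [if_neg hw, if_neg hw]
            have hend' : PySem.Str.endswith d ":*" = false := by
              simp only [Bool.not_eq_true] at hend; exact hend
            have hfil : List.filter (pvDenyPred rest) (PySem.Set.discard s d) =
                List.filter (pvDenyPred (d :: rest)) s := by
              rw [PySem.Set.discard, List.filter_filter]
              apply List.filter_congr
              intro p _
              simp only [pvDenyPred, List.contains_cons, List.filter_cons, hend',
                Bool.false_eq_true, if_false, Bool.not_or]
              cases rest.contains p <;> cases hpd : (p == d) <;>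
                cases ((rest.filter (fun d => PySem.Str.endswith d ":*")).map
                  (fun d => PySem.Str.slice d none (some (-1)))).any
                    (fun pre => PySem.Str.startswith p pre) <;>
                simp_all [BEq.comm]
            rw [hfil]

-- ===== VERDICT (by name: the statement is the Claim_ definition above) =====
theorem resolve_permissions_py_spec : Claim_equal_resolve_permissions_py := by
  intro role_perms custom_granted custom_denied _
  unfold Spec_resolve_permissions_py resolve_permissions_py resolve_permissions_py_alt
  rw [pyAResolveLoop_eq]
  have hpred : (fun p =>
      !PySem.Set.contains (PySem.Set.ofList custom_denied) p &&
        !((custom_denied.filter (fun d => PySem.Str.endswith d ":*")).map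
            (fun d => PySem.Str.slice d none (some (-1)))).any
          (fun pre => PySem.Str.startswith p pre)) = pvDenyPred custom_denied := by
    funext p
    simp only [pvDenyPred]
    congr 1
    congr 1
    rw [Bool.eq_iff_iff, PySem.Set.contains_iff, PySem.Set.mem_ofList, List.contains_iff_mem]
  simp only [hpred]
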